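-- pv_equiv track=rewrite | github.com/horms/ovs | python/ovs/db/idl.py | _parse_remotes
-- ===== SOURCE A (Python) =====
-- def _parse_remotes(remote):
--     # If remote is -
--     # "tcp:10.0.0.1:6641,unix:/tmp/db.sock,t,s,tcp:10.0.0.2:6642"
--     # this function returns
--     # ["tcp:10.0.0.1:6641", "unix:/tmp/db.sock,t,s", tcp:10.0.0.2:6642"]
--     remotes = []
--     for r in remote.split(','):
--         if remotes and r.find(":") == -1:
--             remotes[-1] += "," + r
--         else:
--             remotes.append(r)
--     return remotes
-- ===== SOURCE B (Python) =====
-- def _parse_remotes(remote):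
--     # Build the result back-to-front: walk the comma-separated fragments
--     # from the right, gluing colon-less fragments onto a pending suffix
--     # until a fragment with a colon (a real remote start) absorbs it;
--     # the first fragment always starts a remote.
--     frags = remote.split(',')
--     out = []
--     suffix = ""
--     for r in reversed(frags[1:]):
--         if ':' in r:
--             out.append(r + suffix)
--             suffix = ""
--         else:
--             suffix = "," + r + suffix
--     out.append(frags[0] + suffix)
--     out.reverse()
--     return out
-- ===== Notes on version B (the rewrite author's own statement) =====
-- stated objective: alternative
-- what changed: Replaces A's forward loop that repeatedly rewrites the last element of the accumulator (remotes[-1] += ...) with a right-to-left single pass that carries a pending suffix of colon-less fragments and builds the output back-to-front, reversing once at the end.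
import Mathlib
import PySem

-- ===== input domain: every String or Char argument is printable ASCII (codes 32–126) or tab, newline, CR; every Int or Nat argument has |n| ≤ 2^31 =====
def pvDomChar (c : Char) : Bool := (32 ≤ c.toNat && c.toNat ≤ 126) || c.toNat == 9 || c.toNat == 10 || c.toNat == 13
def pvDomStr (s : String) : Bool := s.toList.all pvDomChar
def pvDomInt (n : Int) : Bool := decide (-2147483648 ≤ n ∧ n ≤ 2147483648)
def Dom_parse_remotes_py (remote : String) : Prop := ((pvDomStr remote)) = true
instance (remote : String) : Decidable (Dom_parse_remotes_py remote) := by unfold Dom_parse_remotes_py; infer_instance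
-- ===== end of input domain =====

-- B builds the result back-to-front in one right-to-left pass carrying a pending
-- suffix, instead of A's forward loop that rewrites the accumulator's last element
-- (objective: alternative decomposition, same cost).
-- Both ports work on List Char fragments (PySem.Chars) and convert to String at the end,
-- which is exact for split/find/in on the ASCII domain.

-- ===== PORT A =====
-- the for-loop: remotes accumulator; `remotes[-1] += "," + r` = dropLast ++ [last ++ ',' ++ r]
def parseALoop : List (List Char) → List (List Char) → List (List Char)
  | remotes, [] => remotes
  | remotes, r :: rest =>
    if remotes ≠ [] ∧ PySem.Chars.find r [':'] = -1 then
      parseALoop (remotes.dropLast ++ [remotes.getLast! ++ [','] ++ r]) rest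
    else
      parseALoop (remotes ++ [r]) rest

def parse_remotes_py (remote : String) : List String :=
  (parseALoop [] (PySem.Chars.splitOn remote.toList [','])).map String.ofList

-- ===== PORT B =====
-- loop body over reversed(frags[1:]) with state (out, suffix)
def parseBStep (st : List (List Char) × List Char) (r : List Char) : List (List Char) × List Char :=
  if PySem.Chars.isIn [':'] r then (st.1 ++ [r ++ st.2], []) else (st.1, [','] ++ r ++ st.2)

def parse_remotes_py_alt (remote : String) : List String :=
  let frags := PySem.Chars.splitOn remote.toList [',']
  -- frags[1:] = drop 1; reversed(...) = .reverse; frags[0] = headI (split is never empty)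
  let st := ((frags.drop 1).reverse).foldl parseBStep ([], [])
  ((st.1 ++ [frags.headI ++ st.2]).reverse).map String.ofList

-- ===== PRECONDITION & SPEC =====
def Spec_parse_remotes_py (remote : String) (out : List String) : Prop := out = parse_remotes_py_alt remote
instance (remote : String) (out : List String) : Decidable (Spec_parse_remotes_py remote out) := by unfold Spec_parse_remotes_py; infer_instance

-- ===== CLAIM (what is proved, stated in full; the proofs are below) =====
def Claim_equal_parse_remotes_py : Prop := ∀ (remote : String), Dom_parse_remotes_py remote → Spec_parse_remotes_py remote (parse_remotes_py remote)

-- ===== LEMMAS AND PROOFS =====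

-- splitOn never returns the empty list
theorem splitOn_go_ne_nil (sep : List Char) (fuel : Nat) (l cur : List Char)
    (acc : List (List Char)) : PySem.Chars.splitOn.go sep fuel l cur acc ≠ [] := by
  induction fuel generalizing l cur acc with
  | zero => simp [PySem.Chars.splitOn.go]
  | succ n ih =>
    cases l with
    | nil => simp [PySem.Chars.splitOn.go]
    | cons c rest =>
      simp only [PySem.Chars.splitOn.go]
      split
      · exact ih _ _ _
      · exact ih _ _ _

theorem splitOn_ne_nil (s sep : List Char) : PySem.Chars.splitOn s sep ≠ [] :=
  splitOn_go_ne_nil sep _ s [] []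

-- unfolding A's loop on a singleton accumulator: a colon-less fragment is merged
theorem parseALoop_merge (r : List Char) (rest : List (List Char)) (a : List Char)
    (h : PySem.Chars.find r [':'] = -1) :
    parseALoop [a] (r :: rest) = parseALoop [a ++ [','] ++ r] rest := by
  simp [parseALoop, h]

-- merging only ever touches the accumulator's last element, so a fixed prefix passes through
theorem parseALoop_shift (rs : List (List Char)) (acc : List (List Char)) (a : List Char) :
    parseALoop (acc ++ [a]) rs = acc ++ parseALoop [a] rs := by
  induction rs generalizing acc a with
  | nil => simp [parseALoop]
  | cons r rest ih =>
    by_cases h : PySem.Chars.find r [':'] = -1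
    · rw [parseALoop_merge r rest a h]
      have hcond : (acc ++ [a] ≠ [] ∧ PySem.Chars.find r [':'] = -1) := ⟨by simp, h⟩
      have hg : (acc ++ [a]).getLast! = a := by simp
      simp only [parseALoop, if_pos hcond, List.dropLast_concat, hg]
      exact ih acc (a ++ [','] ++ r)
    · have h1 : parseALoop (acc ++ [a]) (r :: rest) = parseALoop ((acc ++ [a]) ++ [r]) rest := by
        simp [parseALoop, h]
      have h2 : parseALoop [a] (r :: rest) = parseALoop ([a] ++ [r]) rest := by
        simp [parseALoop, h]
      rw [h1, h2, ih (acc ++ [a]) r, ih [a] r]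
      simp

-- a fragment with a colon starts a new remote
theorem parseALoop_new (r : List Char) (rest : List (List Char)) (a : List Char)
    (h : ¬ PySem.Chars.find r [':'] = -1) :
    parseALoop [a] (r :: rest) = a :: parseALoop [r] rest := by
  have h2 : parseALoop [a] (r :: rest) = parseALoop ([a] ++ [r]) rest := by
    simp [parseALoop, h]
  rw [h2, parseALoop_shift rest [a] r]
  rfl

-- A's colon test and B's are the same test
theorem find_colon_iff (r : List Char) :
    (PySem.Chars.find r [':'] = -1) ↔ PySem.Chars.isIn [':'] r = false := by
  rw [PySem.Chars.find_eq_neg_one_iff]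
  constructor
  · intro h
    cases hb : PySem.Chars.isIn [':'] r with
    | false => rfl
    | true => exact absurd ((PySem.Chars.isIn_iff_infix _ _).1 hb) h
  · intro h hinf
    rw [(PySem.Chars.isIn_iff_infix _ _).2 hinf] at h
    cases h

-- B's right-to-left pass agrees with A's loop started on a single fragment
theorem b_foldr_eq (rs : List (List Char)) (a : List Char) :
    (let st := rs.foldr (fun r st => parseBStep st r) ([], []);
      (st.1 ++ [a ++ st.2]).reverse) = parseALoop [a] rs := by
  induction rs generalizing a with
  | nil => simp [parseALoop]
  | cons r rest ih =>
    simp only [List.foldr_cons]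
    by_cases h : PySem.Chars.isIn [':'] r
    · have hf : ¬ PySem.Chars.find r [':'] = -1 := by
        intro hc; rw [(find_colon_iff r).1 hc] at h; cases h
      rw [parseALoop_new r rest a hf, ← ih r]
      simp [parseBStep, h]
    · have hf : PySem.Chars.find r [':'] = -1 :=
        (find_colon_iff r).2 (by simpa using h)
      rw [parseALoop_merge r rest a hf, ← ih (a ++ [','] ++ r)]
      simp [parseBStep, h]

-- ===== VERDICT (by name: the statement is the Claim_ definition above) =====
theorem parse_remotes_py_spec : Claim_equal_parse_remotes_py := by
  intro remote _
  unfold Spec_parse_remotes_py parse_remotes_py parse_remotes_py_alt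
  obtain ⟨x, xs, hx⟩ := List.exists_cons_of_ne_nil (splitOn_ne_nil remote.toList [','])
  rw [hx]
  simp only [List.drop_succ_cons, List.drop_zero, List.headI_cons, List.foldl_reverse]
  rw [b_foldr_eq xs x]
  have h0 : parseALoop [] (x :: xs) = parseALoop [x] xs := by
    simp [parseALoop]
  rw [h0]
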